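-- pv_equiv track=rewrite | github.com/trackrat-dev/TrackRat | scripts/generate_subway_data.py | _format_route_suffix
-- ===== SOURCE A (Python) =====
-- def _format_route_suffix(routes: set[str]) -> str | None:
--     """Format a set of route IDs into a display suffix like '1/2/3' or 'A/B/C'.
--
--     Filters out express variants (6X, 7X, FX) since the base route is already present.
--     Returns None if no displayable routes remain.
--     """
--     display_routes = {r for r in routes if not r.endswith("X")}
--     if not display_routes:
--         return None
--     # Sort: numbers first (ascending), then letters (alphabetical)
--     sorted_routes = sorted(
--         display_routes,
--         key=lambda r: (not r[0].isdigit(), int(r) if r.isdigit() else 0, r),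
--     )
--     return "/".join(sorted_routes)
-- ===== SOURCE B (Python) =====
-- def _format_route_suffix(routes):
--     """Format a set of route IDs into a display suffix like '1/2/3' or 'A/B/C'.
--
--     Same result as A by a different algorithm: instead of a library sort with a
--     composite tuple key, repeatedly extract the minimal remaining route under an
--     explicit precedence comparison (selection), building the output order directly.
--     """
--     remaining = [r for r in routes if not r.endswith("X")]
--     if not remaining:
--         return None
--     parts = []
--     while remaining:
--         best, remaining = _take_min(remaining)
--         parts.append(best)
--     return "/".join(parts)
--
--
-- def _precedes(a, b):
--     """True iff a must be displayed strictly before b."""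
--     ad, bd = a[0].isdigit(), b[0].isdigit()
--     if ad != bd:
--         return ad  # digit-leading routes come first
--     av = int(a) if a.isdigit() else 0
--     bv = int(b) if b.isdigit() else 0
--     if av != bv:
--         return av < bv
--     return a < b
--
--
-- def _take_min(items):
--     """Return the minimal element of non-empty items and the remaining list."""
--     best, rest = items[0], []
--     for r in items[1:]:
--         if _precedes(r, best):
--             rest.append(best)
--             best = r
--         else:
--             rest.append(r)
--     return best, rest
-- ===== Notes on version B (the rewrite author's own statement) =====
-- stated objective: alternative
-- what changed: Replaced A's single library sort under a 3-component tuple key by selection: repeatedly extract the minimal remaining route under an explicit hand-written precedence comparison, emitting the display order directly.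
import Mathlib
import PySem

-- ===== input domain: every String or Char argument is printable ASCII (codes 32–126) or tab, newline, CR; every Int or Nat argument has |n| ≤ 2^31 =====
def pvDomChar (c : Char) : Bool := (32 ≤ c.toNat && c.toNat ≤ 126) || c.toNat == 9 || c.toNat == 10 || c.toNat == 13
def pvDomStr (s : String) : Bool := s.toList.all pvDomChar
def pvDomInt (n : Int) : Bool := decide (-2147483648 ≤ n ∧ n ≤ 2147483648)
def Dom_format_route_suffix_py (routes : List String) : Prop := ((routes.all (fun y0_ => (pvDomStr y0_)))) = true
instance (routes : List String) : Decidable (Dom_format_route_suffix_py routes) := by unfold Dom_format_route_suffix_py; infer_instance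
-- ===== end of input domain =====

-- B replaces A's single tuple-keyed library sort by selection: repeatedly extract the
-- minimal remaining route under an explicit precedence comparison (alternative algorithm).


-- ===== PORT A =====
-- r[0].isdigit(); r[0] raises IndexError on r = "" (PySem.Str.pyGet? = none there; excluded by Pre_)
def pvDigitFirstA (r : String) : Bool :=
  match PySem.Str.pyGet? r 0 with
  | some c => PySem.Chars.isdigit c
  | none => false

-- int(r) if r.isdigit() else 0; when r.isdigit() holds, int(r) never raises (ofStr? = some), so getD 0 is exact
def pvIntValA (r : String) : Int :=
  if PySem.Str.strIsdigit r then (PySem.Int.ofStr? r).getD 0 else 0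

-- strict lexicographic '<' on A's key tuple (not r[0].isdigit(), int(r) if r.isdigit() else 0, r),
-- written out component by component because the tuple has three components (sorted2 covers two)
def pvKeyLtA (a b : String) : Bool :=
  decide ((!pvDigitFirstA a) < (!pvDigitFirstA b)) ||
  ((!pvDigitFirstA a) == (!pvDigitFirstA b) &&
    (decide (pvIntValA a < pvIntValA b) ||
      (pvIntValA a == pvIntValA b && decide (a < b))))

def format_route_suffix_py (routes : List String) : Option String :=
  let display_routes := PySem.Set.ofList (routes.filter (fun r => !(PySem.Str.endswith r "X")))
  if display_routes = [] then none
  else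
    -- sorted(display_routes, key=…): stable insertion sort with the strict '<' on the key (PySem.List.sorted's shape)
    let sorted_routes := display_routes.foldl (fun acc x => PySem.List.insertBy pvKeyLtA x acc) []
    some (PySem.Str.join "/" sorted_routes)

-- ===== PORT B =====
-- _precedes(a, b): True iff a must be displayed strictly before b
def pvPrecedes (a b : String) : Bool :=
  let ad := match PySem.Str.pyGet? a 0 with
            | some c => PySem.Chars.isdigit c
            | none => false
  let bd := match PySem.Str.pyGet? b 0 with
            | some c => PySem.Chars.isdigit c
            | none => false
  if ad ≠ bd then ad
  else
    let av := if PySem.Str.strIsdigit a then (PySem.Int.ofStr? a).getD 0 else 0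
    let bv := if PySem.Str.strIsdigit b then (PySem.Int.ofStr? b).getD 0 else 0
    if av ≠ bv then decide (av < bv)
    else decide (a < b)

-- _take_min(items): best = items[0] (raises on []; only called on non-empty lists, so the
-- [] branch below is unreachable), then one pass over items[1:] carrying (best, rest)
def pvTakeMin (items : List String) : String × List String :=
  match items with
  | [] => ("", [])
  | x :: xs =>
      xs.foldl (fun st r =>
        if pvPrecedes r st.1 then (r, st.2 ++ [st.1]) else (st.1, st.2 ++ [r])) (x, [])

lemma pvTakeMin_fold_len (xs : List String) (b : String) (acc : List String) :
    ((xs.foldl (fun st r =>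
        if pvPrecedes r st.1 then (r, st.2 ++ [st.1]) else (st.1, st.2 ++ [r])) (b, acc)).2).length
      = acc.length + xs.length := by
  induction xs generalizing b acc with
  | nil => simp
  | cons r t ih =>
    simp only [List.foldl_cons]
    by_cases h : pvPrecedes r b = true <;> simp [h, ih] <;> omega

lemma pvTakeMin_len (x : String) (xs : List String) :
    ((pvTakeMin (x :: xs)).2).length = xs.length := by
  simpa [pvTakeMin] using pvTakeMin_fold_len xs x []

-- the while loop of B: extract the minimum, emit it, recurse on the rest
def pvSelectAll (remaining : List String) : List String :=
  match remaining with
  | [] => []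
  | x :: xs =>
      let st := pvTakeMin (x :: xs)
      st.1 :: pvSelectAll st.2
termination_by remaining.length
decreasing_by simp [pvTakeMin_len x xs]

def format_route_suffix_py_alt (routes : List String) : Option String :=
  let remaining := routes.filter (fun r => !(PySem.Str.endswith r "X"))
  if remaining = [] then none
  else some (PySem.Str.join "/" (pvSelectAll remaining))

-- ===== PRECONDITION & SPEC =====
-- Pre_ excludes "" ∈ routes (there Python A raises IndexError on r[0]) and, since the parameter
-- is a Python set, requires its list representation to hold distinct elements (the set invariant).
def Pre_format_route_suffix_py (routes : List String) : Prop :=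
  "" ∉ routes ∧ routes.Nodup
instance (routes : List String) : Decidable (Pre_format_route_suffix_py routes) := by
  unfold Pre_format_route_suffix_py; infer_instance

def pvWitness_format_route_suffix_py : List String := ["1", "10", "2", "A", "7X", "B"]

def Spec_format_route_suffix_py (routes : List String) (out : Option String) : Prop := out = format_route_suffix_py_alt routes
instance (routes : List String) (out : Option String) : Decidable (Spec_format_route_suffix_py routes out) := by unfold Spec_format_route_suffix_py; infer_instance

-- ===== CLAIM (what is proved, stated in full; the proofs are below) =====
def Claim_equal_format_route_suffix_py : Prop := ∀ (routes : List String), Dom_format_route_suffix_py routes → Pre_format_route_suffix_py routes → Spec_format_route_suffix_py routes (format_route_suffix_py routes)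

-- ===== LEMMAS AND PROOFS =====

-- A's composite sort key, read as a lexicographic triple
def pvKeyA (r : String) : Bool ×ₗ (Int ×ₗ String) :=
  toLex (!pvDigitFirstA r, toLex (pvIntValA r, r))

lemma pvKeyLtA_eq (a b : String) : pvKeyLtA a b = decide (pvKeyA a < pvKeyA b) := by
  simp only [pvKeyLtA, pvKeyA]
  by_cases h1 : (!pvDigitFirstA a) = (!pvDigitFirstA b)
  · simp [h1, Prod.Lex.lt_iff]
    by_cases h2 : pvIntValA a = pvIntValA b <;> simp [h2]
  · rcases lt_or_gt_of_ne (h1 : _ ≠ _) with h | h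
    · simp [h, ne_of_lt h, Prod.Lex.lt_iff]
    · simp [Prod.Lex.lt_iff, not_lt_of_gt h, h1]

lemma pvPrecedes_eq (a b : String) : pvPrecedes a b = pvKeyLtA a b := by
  show (if pvDigitFirstA a ≠ pvDigitFirstA b then pvDigitFirstA a
        else if pvIntValA a ≠ pvIntValA b then decide (pvIntValA a < pvIntValA b)
        else decide (a < b)) = pvKeyLtA a b
  unfold pvKeyLtA
  by_cases h1 : pvDigitFirstA a = pvDigitFirstA b
  · by_cases h2 : pvIntValA a = pvIntValA b <;> simp [h1, h2]
  · cases ha : pvDigitFirstA a <;> cases hb : pvDigitFirstA b <;> simp_all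

lemma pvPrecedes_iff (a b : String) : pvPrecedes a b = true ↔ pvKeyA a < pvKeyA b := by
  rw [pvPrecedes_eq, pvKeyLtA_eq]; simp

lemma pvKeyA_inj {a b : String} (h : pvKeyA a = pvKeyA b) : a = b := by
  have h' : pvDigitFirstA a = pvDigitFirstA b ∧ pvIntValA a = pvIntValA b ∧ a = b := by
    simpa [pvKeyA, Prod.ext_iff] using h
  exact h'.2.2

lemma pvFoldMin (xs : List String) (b : String) (acc : List String)
    (hacc : ∀ y ∈ acc, ¬ (pvKeyA y < pvKeyA b)) :
    ((xs.foldl (fun st r =>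
        if pvPrecedes r st.1 then (r, st.2 ++ [st.1]) else (st.1, st.2 ++ [r])) (b, acc)).1 ::
      (xs.foldl (fun st r =>
        if pvPrecedes r st.1 then (r, st.2 ++ [st.1]) else (st.1, st.2 ++ [r])) (b, acc)).2).Perm
        (b :: acc ++ xs) ∧
    ∀ y ∈ (xs.foldl (fun st r =>
        if pvPrecedes r st.1 then (r, st.2 ++ [st.1]) else (st.1, st.2 ++ [r])) (b, acc)).2,
      ¬ (pvKeyA y < pvKeyA (xs.foldl (fun st r =>
        if pvPrecedes r st.1 then (r, st.2 ++ [st.1]) else (st.1, st.2 ++ [r])) (b, acc)).1) := by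
  induction xs generalizing b acc with
  | nil => exact ⟨by simp, by simpa using hacc⟩
  | cons r t ih =>
    simp only [List.foldl_cons]
    by_cases h : pvPrecedes r b = true
    · have hrb : pvKeyA r < pvKeyA b := (pvPrecedes_iff r b).1 h
      rw [if_pos h]
      have hacc' : ∀ y ∈ acc ++ [b], ¬ (pvKeyA y < pvKeyA r) := by
        intro y hy
        rcases List.mem_append.1 hy with hy | hy
        · exact fun hlt => hacc y hy (hlt.trans hrb)
        · simp only [List.mem_singleton] at hy
          subst hy
          exact not_lt_of_gt hrb
      obtain ⟨hp, hm⟩ := ih r (acc ++ [b]) hacc'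
      refine ⟨hp.trans ?_, hm⟩
      refine List.perm_iff_count.mpr fun x => ?_
      simp only [List.count_cons, List.count_append, List.count_nil]
      split_ifs <;> omega
    · have hrb : ¬ (pvKeyA r < pvKeyA b) := fun hlt => h ((pvPrecedes_iff r b).2 hlt)
      rw [if_neg h]
      have hacc' : ∀ y ∈ acc ++ [r], ¬ (pvKeyA y < pvKeyA b) := by
        intro y hy
        rcases List.mem_append.1 hy with hy | hy
        · exact hacc y hy
        · simp only [List.mem_singleton] at hy
          subst hy
          exact hrb
      obtain ⟨hp, hm⟩ := ih b (acc ++ [r]) hacc'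
      refine ⟨hp.trans ?_, hm⟩
      refine List.perm_iff_count.mpr fun x => ?_
      simp only [List.count_cons, List.count_append, List.count_nil]
      split_ifs <;> omega

lemma pvTakeMin_spec (x : String) (xs : List String) :
    ((pvTakeMin (x :: xs)).1 :: (pvTakeMin (x :: xs)).2).Perm (x :: xs) ∧
    ∀ y ∈ (pvTakeMin (x :: xs)).2, ¬ (pvKeyA y < pvKeyA (pvTakeMin (x :: xs)).1) := by
  simpa [pvTakeMin] using pvFoldMin xs x [] (by simp)

lemma pvSelectAll_perm_aux : ∀ (n : Nat) (l : List String), l.length ≤ n → (pvSelectAll l).Perm l := by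
  intro n
  induction n with
  | zero =>
    intro l hl
    have : l = [] := List.length_eq_zero_iff.1 (Nat.le_zero.1 hl)
    subst this
    simp [pvSelectAll]
  | succ n ih =>
    intro l hl
    match l with
    | [] => simp [pvSelectAll]
    | x :: xs =>
      rw [pvSelectAll]
      obtain ⟨hp, _⟩ := pvTakeMin_spec x xs
      have hlen : ((pvTakeMin (x :: xs)).2).length ≤ n := by
        rw [pvTakeMin_len x xs]
        simpa using Nat.le_of_succ_le_succ hl
      exact ((ih _ hlen).cons _).trans hp

lemma pvSelectAll_perm (l : List String) : (pvSelectAll l).Perm l :=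
  pvSelectAll_perm_aux l.length l le_rfl

lemma pvSelectAll_pairwise_aux : ∀ (n : Nat) (l : List String), l.length ≤ n → l.Nodup →
    (pvSelectAll l).Pairwise (fun a b => pvKeyA a < pvKeyA b) := by
  intro n
  induction n with
  | zero =>
    intro l hl _
    have : l = [] := List.length_eq_zero_iff.1 (Nat.le_zero.1 hl)
    subst this
    simp [pvSelectAll]
  | succ n ih =>
    intro l hl hnd
    match l with
    | [] => simp [pvSelectAll]
    | x :: xs =>
      rw [pvSelectAll]
      obtain ⟨hp, hmin⟩ := pvTakeMin_spec x xs
      have hnd' : ((pvTakeMin (x :: xs)).1 :: (pvTakeMin (x :: xs)).2).Nodup :=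
        hp.nodup_iff.2 hnd
      have hlen : ((pvTakeMin (x :: xs)).2).length ≤ n := by
        rw [pvTakeMin_len x xs]
        simpa using Nat.le_of_succ_le_succ hl
      refine List.Pairwise.cons ?_ (ih _ hlen (List.nodup_cons.1 hnd').2)
      intro y hy
      have hy2 : y ∈ (pvTakeMin (x :: xs)).2 := (pvSelectAll_perm _).subset hy
      have hne : y ≠ (pvTakeMin (x :: xs)).1 := by
        intro he
        exact (List.nodup_cons.1 hnd').1 (he ▸ hy2)
      exact lt_of_le_of_ne (not_lt.1 (hmin y hy2))
        (fun hk => hne (pvKeyA_inj hk).symm)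

lemma pvFoldlAdd_of_disj {α : Type} [BEq α] [LawfulBEq α] (xs : List α) (s : List α)
    (h : xs.Nodup) (hd : ∀ x ∈ xs, x ∉ s) :
    xs.foldl PySem.Set.add s = s ++ xs := by
  induction xs generalizing s with
  | nil => simp
  | cons x t ih =>
    simp only [List.foldl_cons, PySem.Set.add_of_not_mem (hd x (by simp))]
    rw [ih (s ++ [x]) h.of_cons]
    · simp
    · intro y hy
      simp only [List.mem_append, List.mem_singleton]
      rintro (hs | rfl)
      · exact hd y (by simp [hy]) hs
      · exact (List.nodup_cons.1 h).1 hy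

lemma pvOfList_of_nodup {α : Type} [BEq α] [LawfulBEq α] (xs : List α) (h : xs.Nodup) :
    PySem.Set.ofList xs = xs := by
  rw [PySem.Set.ofList_eq_foldl, pvFoldlAdd_of_disj xs [] h (by simp)]
  simp

lemma pvMain (l : List String) (h : l.Nodup) :
    l.foldl (fun acc x => PySem.List.insertBy pvKeyLtA x acc) [] = pvSelectAll l := by
  have hk : pvKeyLtA = fun a b => decide (pvKeyA a < pvKeyA b) :=
    funext fun a => funext fun b => pvKeyLtA_eq a b
  rw [hk, ← PySem.List.sorted_eq_foldl_insertBy l pvKeyA]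
  exact PySem.List.sorted_eq_of_perm_of_pairwise_lt _ _ _
    (pvSelectAll_perm l) (pvSelectAll_pairwise_aux l.length l le_rfl h)

-- ===== VERDICT (by name: the statement is the Claim_ definition above) =====
theorem format_route_suffix_py_spec : Claim_equal_format_route_suffix_py := by
  intro routes _ hpre
  unfold Spec_format_route_suffix_py format_route_suffix_py format_route_suffix_py_alt
  have hnd : (routes.filter (fun r => !(PySem.Str.endswith r "X"))).Nodup := hpre.2.filter _
  simp only [pvOfList_of_nodup _ hnd, pvMain _ hnd]
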